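-- pv_equiv track=rewrite | github.com/mbhaylett23/NupackHairpin | main_script_RUN_laptop.py | try_all_matches
-- ===== SOURCE A (Python) =====
-- def score_match(subject, query, subject_start, query_start, length):
--     score = 0
--     # for each base in the match
--     for i in range(0,length):
--         # first figure out the matching base from both sequences
--         subject_base = subject[subject_start + i]
--         query_base = query[query_start + i]
--         # then adjust the score up or down depending on
--         # whether or not they are the same
--         if subject_base == query_base:
--             score = score + 1
--         else:
--             score = score - 1
--     return score
--
-- def try_all_matches(subject, query, score_limit):
--     matches = []  # List to store all matches meeting the score limit
--     subject_len = len(subject)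
--     max_start = len(query) - subject_len + 1  # Maximum starting index for a full-length subject match within query
--
--     # Slide `subject` across `query` in single increments
--     for query_start in range(max_start):
--         score = score_match(subject, query, 0, query_start, subject_len)  # Full-length match of `subject`
--
--
--         # Check if the score meets or exceeds the threshold
--         if score >= score_limit:
--             query_end = query_start + subject_len
--             matches.append((True, query_start, query_end, subject_len, score))
--
--     # Return the list of matches if any were found, otherwise an empty list
--     return matches if matches else [(False, None, None, None, None)]
-- ===== SOURCE B (Python) =====
-- def _upper(lst, target):
--     # first index idx with lst[idx] > target (lst sorted ascending); binary search
--     lo = 0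
--     hi = len(lst)
--     while lo < hi:
--         mid = (lo + hi) // 2
--         if lst[mid] <= target:
--             lo = mid + 1
--         else:
--             hi = mid
--     return lo
--
-- def try_all_matches(subject, query, score_limit):
--     n = len(subject)
--     m = len(query)
--     max_start = m - n + 1
--     if max_start <= 0:
--         return [(False, None, None, None, None)]
--     # inverted index: character -> (sorted) positions in subject
--     pos = {}
--     for i, c in enumerate(subject):
--         pos.setdefault(c, []).append(i)
--     # cnt[o] = number of matching character pairs at offset o;
--     # only subject positions i with 0 <= j - i < max_start can contribute at query position j
--     cnt = [0] * max_start
--     for j, c in enumerate(query):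
--         lst = pos.get(c, [])
--         lo = _upper(lst, j - max_start)
--         hi = _upper(lst, j)
--         for i in lst[lo:hi]:
--             cnt[j - i] += 1
--     # score at offset o is matches - mismatches = 2*cnt[o] - n
--     matches = [(True, o, o + n, n, 2 * k - n)
--                for o, k in enumerate(cnt) if 2 * k - n >= score_limit]
--     return matches if matches else [(False, None, None, None, None)]
-- ===== Notes on version B (the rewrite author's own statement) =====
-- stated objective: alternative
-- what changed: Replaces the per-offset rescan (score_match loop at every start) by an inverted index char->sorted positions in subject plus a binary-searched window per query position, accumulating a per-offset match counter only over equal-character pairs with a valid offset, then deriving each score as 2*matches - len(subject).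
import Mathlib
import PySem

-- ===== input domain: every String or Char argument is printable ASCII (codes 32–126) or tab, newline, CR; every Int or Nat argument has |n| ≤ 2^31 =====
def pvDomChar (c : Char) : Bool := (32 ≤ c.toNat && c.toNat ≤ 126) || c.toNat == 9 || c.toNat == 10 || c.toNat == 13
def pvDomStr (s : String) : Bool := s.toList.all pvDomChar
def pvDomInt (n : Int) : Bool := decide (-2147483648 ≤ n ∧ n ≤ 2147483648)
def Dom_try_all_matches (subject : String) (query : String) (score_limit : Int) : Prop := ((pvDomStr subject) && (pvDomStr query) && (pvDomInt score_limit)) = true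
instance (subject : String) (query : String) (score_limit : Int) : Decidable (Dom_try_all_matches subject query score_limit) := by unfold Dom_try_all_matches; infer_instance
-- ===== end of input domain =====

-- B replaces A's per-offset rescan by an inverted index (char -> positions in subject) and one
-- sparse pass over equal-character pairs accumulating a per-offset match counter (score = 2*matchesL - n).

-- ===== PORT A =====
def score_match (subject query : String) (subject_start query_start length : Int) : Int :=
  (PySem.List.pyRange 0 length 1).foldl (fun score i =>
    match PySem.Str.pyGet? subject (subject_start + i), PySem.Str.pyGet? query (query_start + i) with
    | some subject_base, some query_base =>
        if subject_base = query_base then score + 1 else score - 1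
    | _, _ => score  -- Python raises IndexError here; unreachable in the in-range calls try_all_matches makes
  ) 0

def try_all_matches (subject : String) (query : String) (score_limit : Int) : List (Bool × Option Int × Option Int × Option Int × Option Int) :=
  let subject_len : Int := PySem.Str.len subject
  let max_start : Int := PySem.Str.len query - subject_len + 1
  let matchesL := (PySem.List.pyRange 0 max_start 1).foldl (fun matchesL query_start =>
    let score := score_match subject query 0 query_start subject_len
    if score ≥ score_limit then
      matchesL ++ [(true, some query_start, some (query_start + subject_len), some subject_len, some score)]
    else matchesL) ([] : List (Bool × Option Int × Option Int × Option Int × Option Int))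
  if matchesL = [] then [(false, none, none, none, none)] else matchesL

-- ===== PORT B =====
-- while-loop binary search of Source B's _upper: first index with lst[idx] > target
-- (lst[mid] is ported as getD; in-range for every call made: lo < hi ≤ lst.length)
def upperIdx (lst : List Int) (target : Int) (lo hi : Nat) : Nat :=
  if lo < hi then
    let mid := (lo + hi) / 2
    if lst.getD mid 0 ≤ target then upperIdx lst target (mid + 1) hi
    else upperIdx lst target lo mid
  else lo
termination_by hi - lo
decreasing_by all_goals omega

def try_all_matches_alt (subject : String) (query : String) (score_limit : Int) : List (Bool × Option Int × Option Int × Option Int × Option Int) :=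
  let n : Int := PySem.Str.len subject
  let m : Int := PySem.Str.len query
  let max_start : Int := m - n + 1
  if max_start ≤ 0 then [(false, none, none, none, none)]
  else
    -- pos.setdefault(c, []).append(i)
    let pos : PySem.Dict Char (List Int) :=
      (PySem.List.enumerate subject.toList).foldl
        (fun d p => d.modify p.2 [] (· ++ [p.1])) PySem.Dict.empty
    let cnt0 : List Int := List.replicate max_start.toNat 0
    let cnt := (PySem.List.enumerate query.toList).foldl
      (fun cnt jc =>
        let lst := pos.getD jc.2 []
        let lo := upperIdx lst (jc.1 - max_start) 0 lst.length
        let hi := upperIdx lst jc.1 0 lst.length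
        (PySem.List.slice lst (some (lo : Int)) (some (hi : Int))).foldl
          (fun cnt i =>
            PySem.List.pySetD cnt (jc.1 - i) (PySem.List.pyGetD cnt (jc.1 - i) 0 + 1)) cnt) cnt0
    let matchesL := (PySem.List.enumerate cnt).foldl
      (fun acc ok => if 2 * ok.2 - n ≥ score_limit then
          acc ++ [(true, some ok.1, some (ok.1 + n), some n, some (2 * ok.2 - n))]
        else acc) ([] : List (Bool × Option Int × Option Int × Option Int × Option Int))
    if matchesL = [] then [(false, none, none, none, none)] else matchesL

-- ===== PRECONDITION & SPEC =====
def Spec_try_all_matches (subject : String) (query : String) (score_limit : Int) (out : List (Bool × Option Int × Option Int × Option Int × Option Int)) : Prop := out = try_all_matches_alt subject query score_limit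
instance (subject : String) (query : String) (score_limit : Int) (out : List (Bool × Option Int × Option Int × Option Int × Option Int)) : Decidable (Spec_try_all_matches subject query score_limit out) := by unfold Spec_try_all_matches; infer_instance

-- ===== CLAIM (what is proved, stated in full; the proofs are below) =====
def Claim_equal_try_all_matches : Prop := ∀ (subject : String) (query : String) (score_limit : Int), Dom_try_all_matches subject query score_limit → Spec_try_all_matches subject query score_limit (try_all_matches subject query score_limit)

-- ===== LEMMAS AND PROOFS =====

-- the per-offset match count both programs compute: #{ k < |s| : s[k] = q[o+k] }
def mcnt (s q : List Char) (o : Int) : Nat :=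
  (List.range s.length).countP (fun k : Nat =>
    decide (PySem.List.pyGetD s (k : Int) ' ' = PySem.List.pyGetD q (o + (k : Int)) ' '))

-- a fold adding +1/-1 per element is 2*(count of hits) - length
theorem foldl_pm_one {α : Type} (l : List α) (p : α → Bool) (a : Int) :
    l.foldl (fun sc i => if p i then sc + 1 else sc - 1) a
      = a + 2 * (l.countP p : Int) - l.length := by
  induction l generalizing a with
  | nil => simp
  | cons x t ih =>
    simp only [List.foldl_cons, List.countP_cons, List.length_cons]
    rw [ih]
    by_cases h : p x = true <;> simp [h] <;> omega

-- A's score_match at offset o equals 2*mcnt - |subject|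
theorem score_eq (subject query : String) (o : Int) (ho : 0 ≤ o)
    (hle : o + (subject.toList.length : Int) ≤ (query.toList.length : Int)) :
    score_match subject query 0 o (subject.toList.length : Int)
      = 2 * (mcnt subject.toList query.toList o : Int) - subject.toList.length := by
  unfold score_match
  rw [PySem.List.pyRange_one, List.foldl_map]
  rw [PySem.List.foldl_congr_mem _ _
    (fun (score : Int) (k : Nat) =>
      if decide (PySem.List.pyGetD subject.toList (k : Int) ' '
            = PySem.List.pyGetD query.toList (o + (k : Int)) ' ') then score + 1 else score - 1)
    _ ?_]
  · rw [foldl_pm_one (List.range (((subject.toList.length : Int)) - 0).toNat)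
        (fun k : Nat => decide (PySem.List.pyGetD subject.toList (k : Int) ' '
            = PySem.List.pyGetD query.toList (o + (k : Int)) ' ')) 0]
    have h2 : (((subject.toList.length : Int)) - 0).toNat = subject.toList.length := by omega
    simp only [h2, List.length_range, mcnt]
    ring
  · intro sc k hk
    rw [List.mem_range] at hk
    have hz : (0 : Int) + ((0 : Int) + (k : Nat)) = ((k : Nat) : Int) := by omega
    have hsub : PySem.Str.pyGet? subject ((0 : Int) + ((0 : Int) + (k : Nat)))
        = some subject.toList[k] := by
      rw [hz, PySem.Str.pyGet?_natCast, List.getElem?_eq_getElem hk]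
    have hq2 : (o + ((k : Nat) : Int)).toNat < query.toList.length := by omega
    have hque : PySem.Str.pyGet? query (o + ((0 : Int) + (k : Nat)))
        = some query.toList[(o + ((k : Nat) : Int)).toNat] := by
      have hq1 : o + ((0 : Int) + (k : Nat)) = (((o + ((k : Nat) : Int)).toNat : Nat) : Int) := by omega
      rw [hq1, PySem.Str.pyGet?_natCast, List.getElem?_eq_getElem hq2]
    have e1 : PySem.List.pyGetD subject.toList ((k : Nat) : Int) ' ' = subject.toList[k] := by
      rw [PySem.List.pyGetD_eq_getElem subject.toList ' ' (by omega) (by omega)]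
      congr 1
    have e2 : PySem.List.pyGetD query.toList (o + ((k : Nat) : Int)) ' '
        = query.toList[(o + ((k : Nat) : Int)).toNat] :=
      PySem.List.pyGetD_eq_getElem query.toList ' ' (by omega) (by omega)
    simp only [hsub, hque, e1, e2, decide_eq_true_eq]

-- pyGetD after pySetD, Int indices
theorem pyGetD_pySetD_int {α : Type} (xs : List α) (a b : Int) (v d : α)
    (ha0 : 0 ≤ a) (ha : a < (xs.length : Int)) (hb0 : 0 ≤ b) :
    PySem.List.pyGetD (PySem.List.pySetD xs a v) b d
      = if b = a then v else PySem.List.pyGetD xs b d := by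
  have e1 : a = ((a.toNat : Nat) : Int) := by omega
  have e2 : b = ((b.toNat : Nat) : Int) := by omega
  rw [e1, e2, PySem.List.pyGetD_pySetD_natCast xs a.toNat b.toNat v d (by omega)]
  by_cases h : b.toNat = a.toNat
  · rw [if_pos h, if_pos (by omega)]
  · rw [if_neg h, if_neg (by omega)]

-- the binary search returns the count of elements ≤ target (stated by its two sides)
theorem upperIdx_inv (lst : List Int) (target : Int) (hs : lst.Pairwise (· ≤ ·)) :
    ∀ (d lo hi : Nat), hi - lo = d → lo ≤ hi → hi ≤ lst.length →
    (∀ k (hk : k < lst.length), k < lo → lst[k] ≤ target) →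
    (∀ k (hk : k < lst.length), hi ≤ k → target < lst[k]) →
    (lo ≤ upperIdx lst target lo hi ∧ upperIdx lst target lo hi ≤ hi ∧
     (∀ k (hk : k < lst.length), k < upperIdx lst target lo hi → lst[k] ≤ target) ∧
     (∀ k (hk : k < lst.length), upperIdx lst target lo hi ≤ k → target < lst[k])) := by
  have hpw := List.pairwise_iff_getElem.mp hs
  intro d
  induction d using Nat.strong_induction_on with
  | _ d ih =>
    intro lo hi hd hlohi hhilen hlow hhigh
    rw [upperIdx]
    by_cases h : lo < hi
    · rw [if_pos h]
      simp only []
      have hmlt : (lo + hi) / 2 < hi := by omega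
      have hmge : lo ≤ (lo + hi) / 2 := by omega
      have hmlen : (lo + hi) / 2 < lst.length := by omega
      have hget : lst.getD ((lo + hi) / 2) 0 = lst[(lo + hi) / 2] :=
        List.getD_eq_getElem lst 0 hmlen
      by_cases hcmp : lst.getD ((lo + hi) / 2) 0 ≤ target
      · rw [if_pos hcmp]
        rw [hget] at hcmp
        have hrec := ih (hi - ((lo + hi) / 2 + 1)) (by omega) ((lo + hi) / 2 + 1) hi
          (by omega) (by omega) hhilen ?_ hhigh
        · exact ⟨by omega, hrec.2.1, hrec.2.2.1, hrec.2.2.2⟩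
        · intro k hk hklt
          by_cases hkm : k = (lo + hi) / 2
          · subst hkm; exact hcmp
          · exact le_trans (hpw k _ hk hmlen (by omega)) hcmp
      · rw [if_neg hcmp]
        push Not at hcmp
        rw [hget] at hcmp
        have hrec := ih ((lo + hi) / 2 - lo) (by omega) lo ((lo + hi) / 2)
          (by omega) (by omega) (by omega) hlow ?_
        · exact ⟨hrec.1, by omega, hrec.2.2.1, hrec.2.2.2⟩
        · intro k hk hkge
          by_cases hkm : k = (lo + hi) / 2
          · subst hkm; exact hcmp
          · exact lt_of_lt_of_le hcmp (hpw _ _ hmlen hk (by omega))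
    · rw [if_neg h]
      have hlh : lo = hi := by omega
      exact ⟨le_refl _, by omega,
        fun k hk hklo => hlow k hk hklo,
        fun k hk hk2 => hhigh k hk (by omega)⟩

theorem upperIdx_spec (lst : List Int) (target : Int) (hs : lst.Pairwise (· ≤ ·)) :
    upperIdx lst target 0 lst.length ≤ lst.length ∧
    (∀ k (hk : k < lst.length), k < upperIdx lst target 0 lst.length → lst[k] ≤ target) ∧
    (∀ k (hk : k < lst.length), upperIdx lst target 0 lst.length ≤ k → target < lst[k]) := by
  have h := upperIdx_inv lst target hs (lst.length - 0) 0 lst.length rfl (by omega) (le_refl _)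
    (by intro k hk hklt; omega) (by intro k hk hkge; omega)
  exact ⟨h.2.1, h.2.2.1, h.2.2.2⟩

-- what lands between the two binary searches: exactly the elements of (ta, tb]
theorem mem_slice_upper_iff (lst : List Int) (hs : lst.Pairwise (· ≤ ·)) (ta tb v : Int) :
    (v ∈ PySem.List.slice lst (some ((upperIdx lst ta 0 lst.length : Nat) : Int))
        (some ((upperIdx lst tb 0 lst.length : Nat) : Int)))
      ↔ (v ∈ lst ∧ ta < v ∧ v ≤ tb) := by
  obtain ⟨h1len, h1lo, h1hi⟩ := upperIdx_spec lst ta hs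
  obtain ⟨h2len, h2lo, h2hi⟩ := upperIdx_spec lst tb hs
  rw [PySem.List.slice_natCast]
  constructor
  · intro hv
    obtain ⟨t, ht, hveq⟩ := List.mem_iff_getElem.mp hv
    have htlen := ht
    simp only [List.length_take, List.length_drop] at htlen
    have ht3 : upperIdx lst ta 0 lst.length + t < lst.length := by omega
    have hveq2 : lst[upperIdx lst ta 0 lst.length + t]'ht3 = v := by
      rw [← hveq, List.getElem_take, List.getElem_drop]
    refine ⟨?_, ?_, ?_⟩
    · rw [← hveq2]; exact List.getElem_mem _
    · rw [← hveq2]; exact h1hi _ ht3 (by omega)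
    · rw [← hveq2]; exact h2lo _ ht3 (by omega)
  · rintro ⟨hv, hta, htb⟩
    obtain ⟨k, hk, hveq⟩ := List.mem_iff_getElem.mp hv
    have hk1 : upperIdx lst ta 0 lst.length ≤ k := by
      by_contra hcon
      push Not at hcon
      have := h1lo k hk hcon
      rw [hveq] at this
      omega
    have hk2 : k < upperIdx lst tb 0 lst.length := by
      by_contra hcon
      push Not at hcon
      have := h2hi k hk hcon
      rw [hveq] at this
      omega
    apply List.mem_iff_getElem.mpr
    have hlt : k - upperIdx lst ta 0 lst.length
        < ((lst.drop (upperIdx lst ta 0 lst.length)).take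
            (upperIdx lst tb 0 lst.length - upperIdx lst ta 0 lst.length)).length := by
      simp only [List.length_take, List.length_drop]
      omega
    refine ⟨k - upperIdx lst ta 0 lst.length, hlt, ?_⟩
    rw [List.getElem_take, List.getElem_drop]
    calc lst[upperIdx lst ta 0 lst.length + (k - upperIdx lst ta 0 lst.length)]'(by omega)
        = lst[k]'hk := by congr 1; omega
      _ = v := hveq

-- inner windowed increment loop preserves the length
theorem inner_len (j : Int) : ∀ (il : List Int) (cnt : List Int),
    (il.foldl (fun cnt i =>
        PySem.List.pySetD cnt (j - i) (PySem.List.pyGetD cnt (j - i) 0 + 1)) cnt).length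
      = cnt.length := by
  intro il
  induction il with
  | nil => intro cnt; rfl
  | cons i t ih =>
    intro cnt
    simp only [List.foldl_cons]
    rw [ih, PySem.List.length_pySetD]

-- inner windowed increment loop adds, at each in-range offset o, the number of hits j - i = o
theorem inner_get (j M o : Int) (ho : 0 ≤ o) (hoM : o < M) :
    ∀ (il : List Int), (∀ i ∈ il, 0 ≤ j - i ∧ j - i < M) →
    ∀ (cnt : List Int), (cnt.length : Int) = M →
    PySem.List.pyGetD (il.foldl (fun cnt i =>
        PySem.List.pySetD cnt (j - i) (PySem.List.pyGetD cnt (j - i) 0 + 1)) cnt) o 0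
      = PySem.List.pyGetD cnt o 0 + (il.countP (fun i => decide (j - i = o)) : Int) := by
  intro il
  induction il with
  | nil => intro _ cnt _; simp
  | cons i t ih =>
    intro hw cnt hl
    simp only [List.foldl_cons, List.countP_cons]
    have hwi := hw i (List.mem_cons_self ..)
    rw [ih (fun x hx => hw x (List.mem_cons_of_mem _ hx)) _
        (by rw [PySem.List.length_pySetD]; exact hl)]
    rw [pyGetD_pySetD_int cnt (j - i) o _ 0 hwi.1 (by omega) ho]
    by_cases he : o = j - i
    · rw [if_pos he]
      have hd : decide (j - i = o) = true := by simp [he]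
      rw [hd, he]
      push_cast
      simp only [if_true]
      ring
    · rw [if_neg he]
      have hd : decide (j - i = o) = false := by simp; omega
      rw [hd]
      push_cast
      ring

theorem outer_len (posf : Int × Char → List Int) : ∀ (jl : List (Int × Char)) (cnt : List Int),
    (jl.foldl (fun cnt jc => (posf jc).foldl (fun cnt i =>
        PySem.List.pySetD cnt (jc.1 - i) (PySem.List.pyGetD cnt (jc.1 - i) 0 + 1)) cnt) cnt).length
      = cnt.length := by
  intro jl
  induction jl with
  | nil => intro cnt; rfl
  | cons jc t ih =>
    intro cnt
    simp only [List.foldl_cons]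
    rw [ih, inner_len]

theorem outer_get (M o : Int) (ho : 0 ≤ o) (hoM : o < M) (posf : Int × Char → List Int) :
    ∀ (jl : List (Int × Char)), (∀ jc ∈ jl, ∀ i ∈ posf jc, 0 ≤ jc.1 - i ∧ jc.1 - i < M) →
    ∀ (cnt : List Int), (cnt.length : Int) = M →
    PySem.List.pyGetD (jl.foldl (fun cnt jc => (posf jc).foldl (fun cnt i =>
        PySem.List.pySetD cnt (jc.1 - i) (PySem.List.pyGetD cnt (jc.1 - i) 0 + 1)) cnt) cnt) o 0
      = PySem.List.pyGetD cnt o 0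
        + (jl.map (fun jc =>
            (((posf jc).countP (fun i => decide (jc.1 - i = o)) : Nat) : Int))).sum := by
  intro jl
  induction jl with
  | nil => intro _ cnt _; simp
  | cons jc t ih =>
    intro hw cnt hl
    simp only [List.foldl_cons, List.map_cons, List.sum_cons]
    rw [ih (fun x hx => hw x (List.mem_cons_of_mem _ hx)) _ (by rw [inner_len]; exact hl)]
    rw [inner_get jc.1 M o ho hoM (posf jc) (hw jc (List.mem_cons_self ..)) cnt hl]
    ring

-- the inverted index: pos[c] is the list of subject positions holding c
theorem pos_getD (s : List Char) (c : Char) :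
    ((PySem.List.enumerate s).foldl (fun d p => d.modify p.2 [] (· ++ [p.1])) PySem.Dict.empty).getD c []
      = (PySem.List.pyRange 0 s.length).filter (fun i => PySem.List.pyGetD s i ' ' == c) := by
  have h1 : (PySem.List.enumerate s).foldl (fun d p => d.modify p.2 [] (· ++ [p.1])) PySem.Dict.empty
      = ((PySem.List.enumerate s).map (fun p => (p.2, p.1))).foldl
          (fun d p => d.modify p.1 [] (· ++ [p.2])) PySem.Dict.empty := by
    rw [List.foldl_map]
  rw [h1, PySem.Dict.getD_foldl_modify_append, PySem.List.enumerate_eq_map_pyRange s ' ']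
  simp [List.map_map, List.filter_map, Function.comp_def]

theorem posF_sorted (s : List Char) (c : Char) :
    ((PySem.List.pyRange 0 s.length).filter
        (fun i => PySem.List.pyGetD s i ' ' == c)).Pairwise (· ≤ ·) :=
  ((PySem.List.pairwise_lt_pyRange_one 0 s.length).filter _).imp le_of_lt

theorem posF_nodup (s : List Char) (c : Char) :
    ((PySem.List.pyRange 0 s.length).filter
        (fun i => PySem.List.pyGetD s i ' ' == c)).Nodup :=
  (PySem.List.nodup_pyRange_one 0 s.length).filter _

theorem posF_mem (s : List Char) (c : Char) (v : Int) :
    v ∈ (PySem.List.pyRange 0 s.length).filter (fun i => PySem.List.pyGetD s i ' ' == c)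
      ↔ (0 ≤ v ∧ v < (s.length : Int) ∧ PySem.List.pyGetD s v ' ' = c) := by
  simp only [List.mem_filter, PySem.List.mem_pyRange_one, beq_iff_eq]
  tauto

-- countP of a predicate with a unique possible witness on a Nodup list
theorem countP_nodup_eq {α : Type} [DecidableEq α] (l : List α) (p : α → Bool) (v : α)
    (hnd : l.Nodup) (hv : ∀ x, p x = true → x = v) :
    l.countP p = if v ∈ l ∧ p v = true then 1 else 0 := by
  induction l with
  | nil => simp
  | cons x t ih =>
    rw [List.nodup_cons] at hnd
    simp only [List.countP_cons, List.mem_cons]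
    rw [ih hnd.2]
    by_cases hpx : p x = true
    · have hxv := hv x hpx; subst hxv
      simp [hpx, hnd.1]
    · by_cases hpv : p v = true
      · have hvx : v ≠ x := fun h => hpx (h ▸ hpv)
        simp [hpx, hpv, hvx]
      · simp [hpx, hpv]

-- hits of one query position j against the windowed slice of a sorted position list
theorem perj (lst : List Int) (hs : lst.Pairwise (· ≤ ·)) (hnd : lst.Nodup)
    (P : Int → Prop) [DecidablePred P] (hmem : ∀ v : Int, v ∈ lst ↔ P v)
    (j o M : Int) (ho : 0 ≤ o) (hoM : o < M) :
    (((PySem.List.slice lst (some ((upperIdx lst (j - M) 0 lst.length : Nat) : Int))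
        (some ((upperIdx lst j 0 lst.length : Nat) : Int))).countP
        (fun i => decide (j - i = o)) : Nat) : Int)
      = if P (j - o) then 1 else 0 := by
  have hndsl : (PySem.List.slice lst (some ((upperIdx lst (j - M) 0 lst.length : Nat) : Int))
      (some ((upperIdx lst j 0 lst.length : Nat) : Int))).Nodup := by
    rw [PySem.List.slice_natCast]
    exact ((List.take_sublist _ _).trans (List.drop_sublist _ _)).nodup hnd
  rw [countP_nodup_eq _ _ (j - o) hndsl (by intro x hx; simp at hx; omega)]
  by_cases hP : P (j - o)
  · rw [if_pos hP]
    have hin := (mem_slice_upper_iff lst hs (j - M) j (j - o)).mpr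
      ⟨(hmem _).mpr hP, by omega, by omega⟩
    rw [if_pos ⟨hin, by simp⟩]
    simp
  · rw [if_neg hP, if_neg ?_]
    · simp
    rintro ⟨hin, -⟩
    exact hP ((hmem _).mp ((mem_slice_upper_iff lst hs (j - M) j (j - o)).mp hin).1)

-- summing an indicator over a list is a countP (Int version)
theorem sum_map_ite_int {α : Type} (l : List α) (P : α → Prop) [DecidablePred P] :
    (l.map (fun x => if P x then (1 : Int) else 0)).sum
      = ((l.countP (fun x => decide (P x)) : Nat) : Int) := by
  induction l with
  | nil => simp
  | cons x t ih =>
    simp only [List.map_cons, List.sum_cons, List.countP_cons, ih]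
    by_cases h : P x <;> simp [h] <;> push_cast <;> ring

-- total hit count at offset o over the whole query is mcnt
theorem sum_eq_mcnt (s q : List Char) (o : Int) (ho : 0 ≤ o)
    (hle : o + (s.length : Int) ≤ (q.length : Int)) :
    ((PySem.List.enumerate q).map (fun jc : Int × Char =>
        if 0 ≤ jc.1 - o ∧ jc.1 - o < (s.length : Int)
            ∧ PySem.List.pyGetD s (jc.1 - o) ' ' = jc.2 then (1 : Int) else 0)).sum
      = ((mcnt s q o : Nat) : Int) := by
  rw [PySem.List.enumerate_eq_map_pyRange q ' ', List.map_map]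
  rw [show PySem.List.len q = (q.length : Int) by simp]
  rw [PySem.List.pyRange_one_append 0 o (q.length : Int) ho (by omega),
      PySem.List.pyRange_one_append o (o + (s.length : Int)) (q.length : Int) (by omega) hle]
  rw [List.map_append, List.map_append, List.sum_append, List.sum_append]
  have hleft : ((PySem.List.pyRange 0 o).map ((fun jc : Int × Char =>
      if 0 ≤ jc.1 - o ∧ jc.1 - o < (s.length : Int)
          ∧ PySem.List.pyGetD s (jc.1 - o) ' ' = jc.2 then (1 : Int) else 0)
        ∘ (fun j => (j, PySem.List.pyGetD q j ' ')))).sum = 0 := by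
    apply List.sum_eq_zero
    intro x hx
    simp only [List.mem_map] at hx
    obtain ⟨j, hj, rfl⟩ := hx
    rw [PySem.List.mem_pyRange_one] at hj
    simp only [Function.comp_apply]
    rw [if_neg (by omega)]
  have hright : ((PySem.List.pyRange (o + (s.length : Int)) (q.length : Int)).map
      ((fun jc : Int × Char =>
      if 0 ≤ jc.1 - o ∧ jc.1 - o < (s.length : Int)
          ∧ PySem.List.pyGetD s (jc.1 - o) ' ' = jc.2 then (1 : Int) else 0)
        ∘ (fun j => (j, PySem.List.pyGetD q j ' ')))).sum = 0 := by
    apply List.sum_eq_zero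
    intro x hx
    simp only [List.mem_map] at hx
    obtain ⟨j, hj, rfl⟩ := hx
    rw [PySem.List.mem_pyRange_one] at hj
    simp only [Function.comp_apply]
    rw [if_neg (by omega)]
  rw [hleft, hright]
  rw [PySem.List.pyRange_one o (o + (s.length : Int)), List.map_map]
  rw [show ((o + (s.length : Int)) - o).toNat = s.length by omega]
  have hmid : ∀ k ∈ List.range s.length,
      (((fun jc : Int × Char =>
        if 0 ≤ jc.1 - o ∧ jc.1 - o < (s.length : Int)
            ∧ PySem.List.pyGetD s (jc.1 - o) ' ' = jc.2 then (1 : Int) else 0)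
        ∘ (fun j => (j, PySem.List.pyGetD q j ' '))) ∘ (fun k : Nat => o + (k : Int))) k
      = (fun k : Nat => if PySem.List.pyGetD s (k : Int) ' '
            = PySem.List.pyGetD q (o + (k : Int)) ' ' then (1 : Int) else 0) k := by
    intro k hk
    rw [List.mem_range] at hk
    simp only [Function.comp_apply, add_sub_cancel_left]
    by_cases hc : PySem.List.pyGetD s (k : Int) ' ' = PySem.List.pyGetD q (o + (k : Int)) ' '
    · rw [if_pos hc, if_pos ⟨by omega, by omega, hc⟩]
    · rw [if_neg hc, if_neg (by rintro ⟨-, -, h⟩; exact hc h)]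
  rw [List.map_congr_left hmid, sum_map_ite_int, mcnt]
  simp

theorem build_eq (ns lim M : Int) (cnt : List Int) (f : Int → Int)
    (hM : (cnt.length : Int) = M)
    (hf : ∀ o : Int, 0 ≤ o → o < M → PySem.List.pyGetD cnt o 0 = f o) :
    (PySem.List.enumerate cnt).foldl (fun acc ok =>
        if 2 * ok.2 - ns ≥ lim then
          acc ++ [(true, some ok.1, some (ok.1 + ns), some ns, some (2 * ok.2 - ns))]
        else acc) ([] : List (Bool × Option Int × Option Int × Option Int × Option Int))
      = (PySem.List.pyRange 0 M).foldl (fun acc o =>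
        if 2 * f o - ns ≥ lim then
          acc ++ [(true, some o, some (o + ns), some ns, some (2 * f o - ns))]
        else acc) [] := by
  rw [PySem.List.enumerate_eq_map_pyRange cnt 0, List.foldl_map]
  rw [show PySem.List.len cnt = M by simp [hM]]
  apply PySem.List.foldl_congr_mem
  intro acc o ho
  rw [PySem.List.mem_pyRange_one] at ho
  simp only [hf o ho.1 ho.2]

-- ===== VERDICT (by name: the statement is the Claim_ definition above) =====
theorem try_all_matches_spec : Claim_equal_try_all_matches := by
  unfold Claim_equal_try_all_matches
  intro subject query score_limit _
  unfold Spec_try_all_matches try_all_matches try_all_matches_alt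
  simp only [PySem.Str.len_eq]
  set ns : Int := (subject.toList.length : Int) with hns
  set mq : Int := (query.toList.length : Int) with hmq
  set M : Int := mq - ns + 1 with hM
  by_cases hMle : M ≤ 0
  · rw [if_pos hMle, PySem.List.pyRange_one_eq_nil hMle]
    simp
  · rw [if_neg hMle]
    set posd := (PySem.List.enumerate subject.toList).foldl
        (fun d p => d.modify p.2 [] (· ++ [p.1])) PySem.Dict.empty with hposd
    set cnt0 : List Int := List.replicate M.toNat 0 with hcnt0
    set cntF := (PySem.List.enumerate query.toList).foldl
      (fun cnt jc =>
        (PySem.List.slice (posd.getD jc.2 [])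
            (some ((upperIdx (posd.getD jc.2 []) (jc.1 - M) 0 (posd.getD jc.2 []).length : Nat) : Int))
            (some ((upperIdx (posd.getD jc.2 []) jc.1 0 (posd.getD jc.2 []).length : Nat) : Int))).foldl
          (fun cnt i =>
            PySem.List.pySetD cnt (jc.1 - i) (PySem.List.pyGetD cnt (jc.1 - i) 0 + 1)) cnt) cnt0
      with hcntF
    have hl0 : (cnt0.length : Int) = M := by
      rw [hcnt0, List.length_replicate]
      omega
    have hwindow : ∀ jc ∈ PySem.List.enumerate query.toList,
        ∀ i ∈ PySem.List.slice (posd.getD jc.2 [])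
            (some ((upperIdx (posd.getD jc.2 []) (jc.1 - M) 0 (posd.getD jc.2 []).length : Nat) : Int))
            (some ((upperIdx (posd.getD jc.2 []) jc.1 0 (posd.getD jc.2 []).length : Nat) : Int)),
        0 ≤ jc.1 - i ∧ jc.1 - i < M := by
      intro jc _ i hi
      rw [hposd] at hi
      simp only [pos_getD] at hi
      have hw2 := (mem_slice_upper_iff _ (posF_sorted subject.toList jc.2) (jc.1 - M) jc.1 i).mp hi
      omega
    have hlen : (cntF.length : Int) = M := by
      rw [hcntF, outer_len (fun jc => PySem.List.slice (posd.getD jc.2 [])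
            (some ((upperIdx (posd.getD jc.2 []) (jc.1 - M) 0 (posd.getD jc.2 []).length : Nat) : Int))
            (some ((upperIdx (posd.getD jc.2 []) jc.1 0 (posd.getD jc.2 []).length : Nat) : Int)))
          (PySem.List.enumerate query.toList) cnt0]
      exact hl0
    have hval : ∀ o : Int, 0 ≤ o → o < M →
        PySem.List.pyGetD cntF o 0 = ((mcnt subject.toList query.toList o : Nat) : Int) := by
      intro o ho hoM
      rw [hcntF, outer_get M o ho hoM
          (fun jc => PySem.List.slice (posd.getD jc.2 [])
            (some ((upperIdx (posd.getD jc.2 []) (jc.1 - M) 0 (posd.getD jc.2 []).length : Nat) : Int))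
            (some ((upperIdx (posd.getD jc.2 []) jc.1 0 (posd.getD jc.2 []).length : Nat) : Int)))
          (PySem.List.enumerate query.toList) hwindow cnt0 hl0]
      have h0 : PySem.List.pyGetD cnt0 o 0 = 0 := by
        rw [PySem.List.pyGetD_eq_getElem cnt0 0 ho (by omega)]
        simp [hcnt0]
      rw [h0, zero_add]
      have hmapc : ∀ jc ∈ PySem.List.enumerate query.toList,
          (fun jc : Int × Char =>
            (((PySem.List.slice (posd.getD jc.2 [])
                (some ((upperIdx (posd.getD jc.2 []) (jc.1 - M) 0 (posd.getD jc.2 []).length : Nat) : Int))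
                (some ((upperIdx (posd.getD jc.2 []) jc.1 0 (posd.getD jc.2 []).length : Nat) : Int))).countP
              (fun i => decide (jc.1 - i = o)) : Nat) : Int)) jc
          = (fun jc : Int × Char =>
              if 0 ≤ jc.1 - o ∧ jc.1 - o < ns
                  ∧ PySem.List.pyGetD subject.toList (jc.1 - o) ' ' = jc.2
              then (1 : Int) else 0) jc := by
        intro jc _
        rw [hposd]
        simp only [pos_getD]
        exact perj _ (posF_sorted subject.toList jc.2) (posF_nodup subject.toList jc.2)
          (fun v => 0 ≤ v ∧ v < (subject.toList.length : Int)
            ∧ PySem.List.pyGetD subject.toList v ' ' = jc.2)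
          (posF_mem subject.toList jc.2) jc.1 o M ho hoM
      rw [List.map_congr_left hmapc]
      exact sum_eq_mcnt subject.toList query.toList o ho (by omega)
    have hAbody : ∀ (acc : List (Bool × Option Int × Option Int × Option Int × Option Int)),
        ∀ o ∈ PySem.List.pyRange 0 M,
        (fun acc (query_start : Int) =>
          if score_match subject query 0 query_start ns ≥ score_limit then
            acc ++ [(true, some query_start, some (query_start + ns), some ns,
              some (score_match subject query 0 query_start ns))]
          else acc) acc o
        = (fun acc (o : Int) =>
            if 2 * ((mcnt subject.toList query.toList o : Nat) : Int) - ns ≥ score_limit then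
              acc ++ [(true, some o, some (o + ns), some ns,
                some (2 * ((mcnt subject.toList query.toList o : Nat) : Int) - ns))]
            else acc) acc o := by
      intro acc o ho
      rw [PySem.List.mem_pyRange_one] at ho
      have hs := score_eq subject query o ho.1 (by omega)
      simp only [← hns] at hs
      simp only [hs]
    rw [PySem.List.foldl_congr_mem _ _ _ _ hAbody]
    rw [build_eq ns score_limit M
        (f := fun o => ((mcnt subject.toList query.toList o : Nat) : Int))]
    · exact hlen
    · exact hval
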